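-- pv_equiv track=rewrite | github.com/mahditalalDev/Longest-Balanced-Subarray | longest_balanced_subarray.py | subarray_length
-- ===== SOURCE A (Python) =====
-- def subarray_length(binary_list):
--         MAX_COUNTER=0
--         COUNTER=0
--         for num in range (len(binary_list) - 1):
--                 if binary_list[num] != binary_list[num + 1]:
--                         COUNTER+=1
--                         if COUNTER > MAX_COUNTER:
--                                 MAX_COUNTER = COUNTER
--                 else:
--                         COUNTER = 0
--         return MAX_COUNTER + 1
-- ===== SOURCE B (Python) =====
-- def subarray_length(binary_list):
--     best = 1
--     start = 0
--     while True:
--         j = _first_break(binary_list, start)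
--         if j is None:
--             return max(best, len(binary_list) - start)
--         best = max(best, j + 1 - start)
--         start = j + 1
--
--
-- def _first_break(xs, start):
--     for j in range(start, len(xs) - 1):
--         if xs[j] == xs[j + 1]:
--             return j
--     return None
-- ===== Notes on version B (the rewrite author's own statement) =====
-- stated objective: alternative
-- what changed: A's online scan maintaining a per-element counter and running maximum is replaced by a segment decomposition: repeatedly locate the next adjacent-equal break and compare whole-segment lengths.
import Mathlib
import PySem

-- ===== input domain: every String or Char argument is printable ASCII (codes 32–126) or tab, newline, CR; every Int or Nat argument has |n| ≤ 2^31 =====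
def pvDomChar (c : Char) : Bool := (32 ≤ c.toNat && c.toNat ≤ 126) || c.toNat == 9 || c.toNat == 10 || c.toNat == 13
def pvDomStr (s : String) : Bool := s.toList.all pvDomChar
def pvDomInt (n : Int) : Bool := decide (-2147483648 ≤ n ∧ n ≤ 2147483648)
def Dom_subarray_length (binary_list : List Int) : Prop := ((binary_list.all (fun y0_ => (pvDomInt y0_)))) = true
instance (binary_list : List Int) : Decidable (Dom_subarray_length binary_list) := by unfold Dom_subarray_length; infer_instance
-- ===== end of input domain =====

-- B replaces A's online counter/maximum scan by a segment decomposition: repeatedly find the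
-- next adjacent-equal break and compare whole-segment lengths (objective: alternative, same cost).


-- ===== PORT A =====
-- literal port of A: for num in range(len(bl)-1): compare bl[num], bl[num+1] (always in
-- range, so pyGetD is exact here), bump/reset COUNTER, track MAX_COUNTER; return MAX+1
def subarray_length (binary_list : List Int) : Int :=
  let r := (PySem.List.pyRange 0 ((binary_list.length : Int) - 1) 1).foldl
    (fun (st : Int × Int) num =>
      if PySem.List.pyGetD binary_list num 0 ≠ PySem.List.pyGetD binary_list (num + 1) 0 then
        if st.2 + 1 > st.1 then (st.2 + 1, st.2 + 1) else (st.1, st.2 + 1)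
      else (st.1, 0))
    (0, 0)
  r.1 + 1

-- ===== PORT B =====
-- port of _first_break's for loop with early return: scan the index range, first hit wins
def fbGo (bl : List Int) : List Int → Option Int
  | [] => none
  | j :: rest =>
      if PySem.List.pyGetD bl j 0 == PySem.List.pyGetD bl (j + 1) 0 then some j
      else fbGo bl rest

-- port of _first_break(xs, start): for j in range(start, len(xs) - 1)
def firstBreakFrom (bl : List Int) (start : Int) : Option Int :=
  fbGo bl (PySem.List.pyRange start ((bl.length : Int) - 1) 1)

-- needed by altGo's termination
theorem fbGo_mem (bl : List Int) : ∀ (l : List Int) (j : Int), fbGo bl l = some j → j ∈ l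
  | [], j => by intro h; simp [fbGo] at h
  | k :: rest, j => by
      intro h
      simp only [fbGo] at h
      split at h
      · simp at h; simp [h]
      · exact List.mem_cons_of_mem _ (fbGo_mem bl rest j h)

-- needed by altGo's termination
theorem firstBreakFrom_bounds (bl : List Int) (start j : Int)
    (h : firstBreakFrom bl start = some j) : start ≤ j ∧ j < (bl.length : Int) - 1 := by
  have := fbGo_mem bl _ j h
  exact (PySem.List.mem_pyRange_one).mp this

-- port of B's while loop: best / start are the loop variables
def altGo (bl : List Int) (best : Int) (start : Int) : Int :=
  match h : firstBreakFrom bl start with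
  | some j => altGo bl (max best (j + 1 - start)) (j + 1)
  | none => max best ((bl.length : Int) - start)
termination_by ((bl.length : Int) - start).toNat
decreasing_by
  have := firstBreakFrom_bounds bl start j h
  omega

-- literal port of B
def subarray_length_alt (binary_list : List Int) : Int :=
  altGo binary_list 1 0

-- ===== PRECONDITION & SPEC =====
def Spec_subarray_length (binary_list : List Int) (out : Int) : Prop := out = subarray_length_alt binary_list
instance (binary_list : List Int) (out : Int) : Decidable (Spec_subarray_length binary_list out) := by unfold Spec_subarray_length; infer_instance

-- ===== CLAIM (what is proved, stated in full; the proofs are below) =====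
def Claim_equal_subarray_length : Prop := ∀ (binary_list : List Int), Dom_subarray_length binary_list → Spec_subarray_length binary_list (subarray_length binary_list)

-- ===== LEMMAS AND PROOFS =====

-- the adjacency-difference sequence of a list
def diffs : List Int → List Bool
  | a :: b :: rest => (decide (a ≠ b)) :: diffs (b :: rest)
  | _ => []

-- A's loop, as a structural recursion over the difference sequence
def loop : List Bool → Int × Int → Int × Int
  | [], s => s
  | d :: ds, s =>
      loop ds (if d then (if s.2 + 1 > s.1 then (s.2 + 1, s.2 + 1) else (s.1, s.2 + 1)) else (s.1, 0))

theorem loop_true (ds : List Bool) (M C : Int) :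
    loop (true :: ds) (M, C) = loop ds (max M (C + 1), C + 1) := by
  simp only [loop, if_true]
  congr 1
  split <;> simp <;> omega

theorem loop_false (ds : List Bool) (M C : Int) :
    loop (false :: ds) (M, C) = loop ds (M, 0) := by
  simp [loop]

theorem loop_append (xs ys : List Bool) (s : Int × Int) :
    loop (xs ++ ys) s = loop ys (loop xs s) := by
  induction xs generalizing s with
  | nil => simp [loop]
  | cons d xs ih => simp only [List.cons_append, loop]; exact ih _

theorem loop_replicate_true (j : Nat) :
    ∀ (M C : Int), C ≤ M → loop (List.replicate j true) (M, C) = (max M (C + j), C + j) := by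
  induction j with
  | zero => intro M C h; simp [loop]; omega
  | succ j ih =>
      intro M C h
      rw [List.replicate_succ, loop_true, ih (max M (C + 1)) (C + 1) (le_max_right _ _)]
      simp only [Prod.mk.injEq]
      push_cast
      omega

theorem loop_max_split (ds : List Bool) :
    ∀ (M₁ M₂ C : Int), (loop ds (max M₁ M₂, C)).1 = max M₁ (loop ds (M₂, C)).1 := by
  induction ds with
  | nil => intro M₁ M₂ C; simp [loop]
  | cons d ds ih =>
      intro M₁ M₂ C
      cases d
      · rw [loop_false, loop_false]; exact ih _ _ _
      · rw [loop_true, loop_true, max_assoc]; exact ih _ _ _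

-- A's foldl over the index range computes loop over the difference sequence
theorem fold_eq_loop (bl : List Int) :
    ∀ (s : Int × Int),
      (List.range (bl.length - 1)).foldl
        (fun st k =>
          if bl.getD k 0 ≠ bl.getD (k + 1) 0 then
            if st.2 + 1 > st.1 then (st.2 + 1, st.2 + 1) else (st.1, st.2 + 1)
          else (st.1, 0)) s
      = loop (diffs bl) s := by
  induction bl with
  | nil => intro s; simp [diffs, loop]
  | cons a bl ih =>
      intro s
      match bl with
      | [] => simp [diffs, loop]
      | b :: rest =>
          have hlen : (a :: b :: rest).length - 1 = (b :: rest).length - 1 + 1 := by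
            simp
          rw [hlen, List.range_succ_eq_map, List.foldl_cons, List.foldl_map]
          simp only [List.getD_cons_zero, List.getD_cons_succ]
          simp only [List.getD_cons_succ] at ih
          rw [ih]
          simp [diffs, loop]

theorem subarray_length_eq_loop (bl : List Int) :
    subarray_length bl = (loop (diffs bl) (0, 0)).1 + 1 := by
  unfold subarray_length
  rw [PySem.List.pyRange_one]
  have h1 : ((bl.length : Int) - 1 - 0).toNat = bl.length - 1 := by omega
  rw [h1, List.foldl_map]
  have h2 :
      (fun (st : Int × Int) (k : Nat) =>
        if PySem.List.pyGetD bl ((0 : Int) + k) 0 ≠ PySem.List.pyGetD bl ((0 : Int) + k + 1) 0 then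
          if st.2 + 1 > st.1 then (st.2 + 1, st.2 + 1) else (st.1, st.2 + 1)
        else (st.1, 0))
      = (fun (st : Int × Int) (k : Nat) =>
        if bl.getD k 0 ≠ bl.getD (k + 1) 0 then
          if st.2 + 1 > st.1 then (st.2 + 1, st.2 + 1) else (st.1, st.2 + 1)
        else (st.1, 0)) := by
    funext st k
    have hk : ((0 : Int) + k) = ((k : Nat) : Int) := by ring
    have hk1 : (((k : Nat) : Int) + 1) = (((k + 1 : Nat)) : Int) := by push_cast; ring
    rw [hk, hk1, PySem.List.pyGetD_natCast, PySem.List.pyGetD_natCast]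
  rw [h2, fold_eq_loop]

-- structural first-break finder, the reference for both sides of the proof
def firstBreak : List Int → Option Nat
  | a :: b :: rest => if a == b then some 0 else (firstBreak (b :: rest)).map (· + 1)
  | _ => none

theorem firstBreak_lt : ∀ (xs : List Int) (j : Nat), firstBreak xs = some j → j + 1 < xs.length
  | a :: b :: rest, j => by
    intro h
    simp only [firstBreak] at h
    split at h
    · simp only [Option.some.injEq] at h
      simp only [List.length_cons]
      omega
    · rcases Option.map_eq_some_iff.mp h with ⟨j', hj', rfl⟩
      have := firstBreak_lt (b :: rest) j' hj'
      simp only [List.length_cons] at this ⊢; omega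
  | [], j => by intro h; simp [firstBreak] at h
  | [a], j => by intro h; simp [firstBreak] at h

theorem firstBreak_short (xs : List Int) (h : xs.length ≤ 1) : firstBreak xs = none := by
  match xs with
  | [] => rfl
  | [a] => rfl
  | a :: b :: rest => simp at h

-- reference recursion: split at the first break, recurse on the rest
def refAlt (bl : List Int) : Int :=
  match h : firstBreak bl with
  | some j => max ((j : Int) + 1) (refAlt (bl.drop (j + 1)))
  | none => max (bl.length : Int) 1
termination_by bl.length
decreasing_by
  have := firstBreak_lt bl j h
  simp only [List.length_drop]
  omega

theorem refAlt_some (bl : List Int) (j : Nat) (h : firstBreak bl = some j) :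
    refAlt bl = max ((j : Int) + 1) (refAlt (bl.drop (j + 1))) := by
  rw [refAlt.eq_def]
  split
  · rename_i j' h'
    rw [h] at h'
    injection h' with e
    subst e
    rfl
  · rename_i h'
    rw [h] at h'
    exact absurd h' (by simp)

theorem refAlt_none (bl : List Int) (h : firstBreak bl = none) :
    refAlt bl = max (bl.length : Int) 1 := by
  rw [refAlt.eq_def]
  split
  · rename_i j' h'
    rw [h] at h'
    exact absurd h' (by simp)
  · rfl

theorem refAlt_ge_one (bl : List Int) : 1 ≤ refAlt bl := by
  cases h : firstBreak bl with
  | none => rw [refAlt_none bl h]; omega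
  | some j =>
      rw [refAlt_some bl j h]
      have : (1 : Int) ≤ (j : Int) + 1 := by omega
      exact le_trans this (le_max_left _ _)

-- structure of diffs when there is no break: all-true of length n-1
theorem diffs_of_firstBreak_none : ∀ (bl : List Int), firstBreak bl = none →
    diffs bl = List.replicate (bl.length - 1) true
  | [] => by intro _; simp [diffs]
  | [a] => by intro _; simp [diffs]
  | a :: b :: rest => by
      intro h
      simp only [firstBreak] at h
      split at h
      · simp at h
      · rename_i hab
        have hne : a ≠ b := fun e => hab (by simp [e])
        rcases Option.map_eq_none_iff.mp h with h'
        have := diffs_of_firstBreak_none (b :: rest) h'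
        simp only [diffs, this]
        have hl : (a :: b :: rest).length - 1 = ((b :: rest).length - 1) + 1 := by simp
        rw [hl, List.replicate_succ]
        simp [hne]

-- structure of diffs at the first break
theorem diffs_of_firstBreak_some : ∀ (bl : List Int) (j : Nat), firstBreak bl = some j →
    diffs bl = List.replicate j true ++ false :: diffs (bl.drop (j + 1))
  | a :: b :: rest, j => by
      intro h
      simp only [firstBreak] at h
      split at h
      · rename_i hab
        have heq : a = b := eq_of_beq hab
        simp at h
        subst h
        simp [diffs, heq]
      · rename_i hab
        have hne : a ≠ b := fun e => hab (by simp [e])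
        rcases Option.map_eq_some_iff.mp h with ⟨j', hj', rfl⟩
        have := diffs_of_firstBreak_some (b :: rest) j' hj'
        simp only [diffs, this, List.replicate_succ]
        simp [hne]
  | [], j => by intro h; simp [firstBreak] at h
  | [a], j => by intro h; simp [firstBreak] at h

-- A computes the reference recursion
theorem a_eq_ref : ∀ (bl : List Int), subarray_length bl = refAlt bl := by
  intro bl
  induction hn : bl.length using Nat.strong_induction_on generalizing bl with
  | _ n ih =>
  rw [subarray_length_eq_loop]
  cases hfb : firstBreak bl with
  | none =>
      rw [refAlt_none bl hfb, diffs_of_firstBreak_none bl hfb,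
        loop_replicate_true (bl.length - 1) 0 0 le_rfl]
      simp only
      omega
  | some j =>
      have hlt := firstBreak_lt bl j hfb
      rw [refAlt_some bl j hfb, diffs_of_firstBreak_some bl j hfb, loop_append,
        loop_replicate_true j 0 0 le_rfl, loop_false]
      have h3 : max (0 : Int) (0 + (j : Int)) = max (j : Int) 0 := by omega
      rw [h3, loop_max_split]
      have hrec : subarray_length (bl.drop (j + 1)) = refAlt (bl.drop (j + 1)) := by
        exact ih (bl.drop (j + 1)).length (by simp [List.length_drop]; omega) _ rfl
      rw [subarray_length_eq_loop] at hrec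
      rw [← hrec]
      omega

-- B's index-based break finder agrees with the structural one on the dropped suffix
theorem firstBreakFrom_eq (bl : List Int) : ∀ (s : Nat),
    firstBreakFrom bl (s : Int)
      = Option.map (fun j' : Nat => ((s + j' : Nat) : Int)) (firstBreak (bl.drop s)) := by
  intro s
  induction hm : bl.length - s using Nat.strong_induction_on generalizing s with
  | _ m ih =>
  unfold firstBreakFrom
  by_cases hcase : (bl.length : Int) - 1 ≤ (s : Int)
  · rw [PySem.List.pyRange_one_eq_nil hcase]
    have hshort : (bl.drop s).length ≤ 1 := by simp [List.length_drop]; omega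
    rw [firstBreak_short _ hshort]
    rfl
  · push Not at hcase
    have hs1 : s + 1 < bl.length := by omega
    rw [PySem.List.pyRange_one_cons (by omega)]
    -- the dropped suffix has at least two elements
    match hdrop : bl.drop s with
    | [] => exfalso; have := congrArg List.length hdrop; simp [List.length_drop] at this; omega
    | [a] => exfalso; have := congrArg List.length hdrop; simp [List.length_drop] at this; omega
    | a :: b :: rest =>
        have hga : bl[s]? = some a := by
          have : (bl.drop s)[0]? = some a := by rw [hdrop]; rfl
          rw [List.getElem?_drop] at this
          simpa using this
        have hgb : bl[s + 1]? = some b := by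
          have : (bl.drop s)[1]? = some b := by rw [hdrop]; rfl
          rw [List.getElem?_drop] at this
          simpa using this
        have hda : PySem.List.pyGetD bl (s : Int) 0 = a := by
          rw [PySem.List.pyGetD_natCast]
          simp [List.getD, hga]
        have hdb : PySem.List.pyGetD bl ((s : Int) + 1) 0 = b := by
          have hc : ((s : Int) + 1) = ((s + 1 : Nat) : Int) := by push_cast; ring
          rw [hc, PySem.List.pyGetD_natCast]
          simp [List.getD, hgb]
        simp only [fbGo, hda, hdb]
        by_cases hab : a = b
        · simp [hab, firstBreak]
        · have hbeq : (a == b) = false := by simp [hab]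
          simp only [hbeq, Bool.false_eq_true, if_false, firstBreak]
          have hc : ((s : Int) + 1) = ((s + 1 : Nat) : Int) := by push_cast; ring
          have ihs : firstBreakFrom bl ((s + 1 : Nat) : Int)
              = Option.map (fun j' : Nat => ((s + 1 + j' : Nat) : Int)) (firstBreak (bl.drop (s + 1))) := by
            exact ih (bl.length - (s + 1)) (by omega) (s + 1) rfl
          unfold firstBreakFrom at ihs
          rw [← hc] at ihs
          rw [ihs]
          have hdrop1 : bl.drop (s + 1) = b :: rest := by
            have : bl.drop (s + 1) = (bl.drop s).drop 1 := by
              rw [List.drop_drop]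
            rw [this, hdrop]
            rfl
          rw [hdrop1]
          simp only [Option.map_map]
          congr 1
          funext j'
          simp only [Function.comp]
          push_cast
          ring

-- unfolding lemmas for altGo's well-founded recursion
theorem altGo_some (bl : List Int) (best start j : Int) (h : firstBreakFrom bl start = some j) :
    altGo bl best start = altGo bl (max best (j + 1 - start)) (j + 1) := by
  rw [altGo.eq_def]
  split
  · rename_i j' h'
    rw [h] at h'
    injection h' with e
    subst e
    rfl
  · rename_i h'
    rw [h] at h'
    exact absurd h' (by simp)

theorem altGo_none (bl : List Int) (best start : Int) (h : firstBreakFrom bl start = none) :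
    altGo bl best start = max best ((bl.length : Int) - start) := by
  rw [altGo.eq_def]
  split
  · rename_i j' h'
    rw [h] at h'
    exact absurd h' (by simp)
  · rfl

-- B's loop accumulates the reference recursion on the remaining suffix
theorem altGo_eq_ref (bl : List Int) : ∀ (s : Nat) (best : Int), s ≤ bl.length → 1 ≤ best →
    altGo bl best (s : Int) = max best (refAlt (bl.drop s)) := by
  intro s
  induction hm : bl.length - s using Nat.strong_induction_on generalizing s with
  | _ m ih =>
  intro best hs hb
  cases hfb : firstBreakFrom bl (s : Int) with
  | none =>
      rw [altGo_none _ _ _ hfb]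
      rw [firstBreakFrom_eq bl s] at hfb
      have hnone := Option.map_eq_none_iff.mp hfb
      rw [refAlt_none _ hnone]
      simp only [List.length_drop]
      omega
  | some j =>
      have hbounds := firstBreakFrom_bounds bl _ _ hfb
      rw [altGo_some _ _ _ _ hfb]
      rw [firstBreakFrom_eq bl s] at hfb
      rcases Option.map_eq_some_iff.mp hfb with ⟨j', hj', hjj⟩
      have hlt' := firstBreak_lt _ _ hj'
      simp only [List.length_drop] at hlt'
      have hj1 : j + 1 = ((s + (j' + 1) : Nat) : Int) := by rw [← hjj]; push_cast; ring
      have hrec := ih (bl.length - (s + (j' + 1))) (by omega) (s + (j' + 1)) rfl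
        (max best (j + 1 - (s : Int))) (by omega) (le_trans hb (le_max_left _ _))
      rw [hj1] at hrec
      rw [hj1, hrec, refAlt_some _ _ hj']
      have hdd : (bl.drop s).drop (j' + 1) = bl.drop (s + (j' + 1)) := by
        rw [List.drop_drop]
      rw [hdd]
      have hjeq : j = ((s + j' : Nat) : Int) := hjj.symm
      push_cast at hjeq
      omega

theorem main_eq (bl : List Int) : subarray_length bl = subarray_length_alt bl := by
  rw [a_eq_ref]
  unfold subarray_length_alt
  have h0 : (0 : Int) = ((0 : Nat) : Int) := rfl
  rw [h0, altGo_eq_ref bl 0 1 (Nat.zero_le _) le_rfl]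
  simp only [List.drop_zero]
  have := refAlt_ge_one bl
  omega

-- ===== VERDICT (by name: the statement is the Claim_ definition above) =====
theorem subarray_length_spec : Claim_equal_subarray_length := by
  intro bl _
  unfold Spec_subarray_length
  exact main_eq bl
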